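-- pv_equiv track=rewrite | github.com/Qiskit/red-queen | report/loader.py | group_benchmarks
-- ===== SOURCE A (Python) =====
-- from collections import defaultdict
--
-- def group_benchmarks(benchmarks, group_by):
--     groups = defaultdict(list)
--     for bench in benchmarks:
--         key = tuple()
--         for grouping in group_by.split(","):
--             if grouping == "name":
--                 key += (bench["name"],)
--             elif grouping == "tool":
--                 key += (bench["tool"],)
--             elif grouping == "method":
--                 key += (bench["method"],)
--             else:
--                 raise NotImplementedError(f"Unsupported grouping {group_by}")
--         groups[" ".join(str(p) for p in key if p) or None].append(bench)
--
--     return sorted(groups.items(), key=lambda pair: pair[0] or "")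
-- ===== SOURCE B (Python) =====
-- def group_benchmarks(benchmarks, group_by):
--     fields = group_by.split(",")
--
--     def keyfn(bench):
--         parts = []
--         for f in fields:
--             if f not in ("name", "tool", "method"):
--                 raise NotImplementedError(f"Unsupported grouping {group_by}")
--             parts.append(bench[f])
--         return " ".join(str(p) for p in parts if p) or None
--
--     keys = []
--     for b in benchmarks:
--         k = keyfn(b)
--         if k not in keys:
--             keys.append(k)
--     keys.sort(key=lambda k: k or "")
--     return [(k, [b for b in benchmarks if keyfn(b) == k]) for k in keys]
-- ===== Notes on version B (the rewrite author's own statement) =====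
-- stated objective: simpler
-- what changed: Replaces A's defaultdict accumulation followed by sorting the (key, group) items with: dedup the key sequence in first-occurrence order, sort the keys, then build each group by filtering the benchmark list per key - no dict is ever built.
import Mathlib
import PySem

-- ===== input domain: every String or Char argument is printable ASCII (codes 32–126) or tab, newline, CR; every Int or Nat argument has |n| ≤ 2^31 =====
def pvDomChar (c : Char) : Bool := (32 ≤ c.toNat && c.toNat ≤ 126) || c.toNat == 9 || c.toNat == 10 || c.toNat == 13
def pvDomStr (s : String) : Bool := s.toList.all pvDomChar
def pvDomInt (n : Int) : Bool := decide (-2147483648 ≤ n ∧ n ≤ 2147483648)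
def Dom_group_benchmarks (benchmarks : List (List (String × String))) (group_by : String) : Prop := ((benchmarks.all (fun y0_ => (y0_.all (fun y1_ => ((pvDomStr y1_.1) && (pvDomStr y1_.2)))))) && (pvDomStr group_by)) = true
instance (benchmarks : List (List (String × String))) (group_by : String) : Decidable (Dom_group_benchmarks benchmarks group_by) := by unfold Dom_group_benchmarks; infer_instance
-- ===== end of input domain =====

-- B replaces A's defaultdict-accumulate-then-sort-items by: dedup the key list in first-occurrence
-- order, sort the keys, and build each group with one filter per key (objective: simpler; not faster).

-- ===== PORT A =====
-- one iteration of A's key loop: appends bench[field] per grouping, none = raise (NotImplementedError/KeyError)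
def pvStepA (b : List (String × String)) (acc : Option (List String)) (g : String) : Option (List String) :=
  match acc with
  | none => none
  | some ps =>
    if g == "name" then (List.lookup "name" b).map (fun v => ps ++ [v])
    else if g == "tool" then (List.lookup "tool" b).map (fun v => ps ++ [v])
    else if g == "method" then (List.lookup "method" b).map (fun v => ps ++ [v])
    else none

def pvPartsA (b : List (String × String)) (fields : List String) : Option (List String) :=
  fields.foldl (pvStepA b) (some [])

-- '" ".join(str(p) for p in key if p) or None'
def pvKeyA (b : List (String × String)) (fields : List String) : Option (Option String) :=
  (pvPartsA b fields).map (fun ps =>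
    let s := PySem.Str.join " " (ps.filter (fun p => !(p == "")))
    if s == "" then none else some s)

def group_benchmarks (benchmarks : List (List (String × String))) (group_by : String) : List (Option String × (List (List (String × String)))) :=
  let fields := (PySem.Str.split? group_by ",").getD []
  let groups := benchmarks.foldl (fun d b =>
    match pvKeyA b fields with
    | some k => d.modify k [] (fun g => g ++ [b])
    | none => d)   -- unreachable under Pre_ (Python raises here)
    (PySem.Dict.empty : PySem.Dict (Option String) (List (List (String × String))))
  PySem.List.sorted groups.items (fun p => p.1.getD "") false

-- ===== PORT B =====
-- B's keyfn: membership test on the field name, then bench[f]; none = raise (outside Pre_)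
def pvStepB (b : List (String × String)) (acc : Option (List String)) (f : String) : Option (List String) :=
  match acc with
  | none => none
  | some ps =>
    if f == "name" || f == "tool" || f == "method" then (List.lookup f b).map (fun v => ps ++ [v])
    else none

def pvKeyB (b : List (String × String)) (fields : List String) : Option (Option String) :=
  match fields.foldl (pvStepB b) (some []) with
  | none => none
  | some ps =>
    let s := PySem.Str.join " " (ps.filter (fun p => !(p == "")))
    some (if s == "" then none else some s)

def group_benchmarks_alt (benchmarks : List (List (String × String))) (group_by : String) : List (Option String × (List (List (String × String)))) :=
  let fields := (PySem.Str.split? group_by ",").getD []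
  let keys := PySem.List.dedup (benchmarks.map (fun b => (pvKeyB b fields).getD none))
  let ksorted := PySem.List.sorted keys (fun k => k.getD "") false
  ksorted.map (fun k => (k, benchmarks.filter (fun b => (pvKeyB b fields).getD none == k)))

-- ===== PRECONDITION & SPEC =====
-- Pre_ excludes exactly the inputs where Python A raises: a grouping other than
-- name/tool/method (NotImplementedError) or a benchmark missing a grouped field (KeyError).
def Pre_group_benchmarks (benchmarks : List (List (String × String))) (group_by : String) : Prop :=
  ∀ b ∈ benchmarks, ∀ f ∈ (PySem.Str.split? group_by ",").getD [],
    (f = "name" ∨ f = "tool" ∨ f = "method") ∧ (List.lookup f b).isSome = true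
instance (benchmarks : List (List (String × String))) (group_by : String) : Decidable (Pre_group_benchmarks benchmarks group_by) := by unfold Pre_group_benchmarks; infer_instance

def pvWitness_group_benchmarks : (List (List (String × String))) × String :=
  ([[("name", "qft"), ("tool", "qiskit")], [("name", ""), ("tool", "tket")]], "name,tool")

def Spec_group_benchmarks (benchmarks : List (List (String × String))) (group_by : String) (out : List (Option String × (List (List (String × String))))) : Prop := out = group_benchmarks_alt benchmarks group_by
instance (benchmarks : List (List (String × String))) (group_by : String) (out : List (Option String × (List (List (String × String))))) : Decidable (Spec_group_benchmarks benchmarks group_by out) := by unfold Spec_group_benchmarks; infer_instance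

-- ===== CLAIM (what is proved, stated in full; the proofs are below) =====
def Claim_equal_group_benchmarks : Prop := ∀ (benchmarks : List (List (String × String))) (group_by : String), Dom_group_benchmarks benchmarks group_by → Pre_group_benchmarks benchmarks group_by → Spec_group_benchmarks benchmarks group_by (group_benchmarks benchmarks group_by)

-- ===== LEMMAS AND PROOFS =====

-- B's key function computes A's key function
theorem pvKeyB_eq_pvKeyA (b : List (String × String)) (fields : List String) :
    pvKeyB b fields = pvKeyA b fields := by
  have hstep : ∀ acc f, pvStepB b acc f = pvStepA b acc f := by
    intro acc f
    match acc with
    | none => rfl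
    | some ps =>
      by_cases h1 : f = "name"
      · subst h1; rfl
      · by_cases h2 : f = "tool"
        · subst h2; rfl
        · by_cases h3 : f = "method"
          · subst h3; rfl
          · simp [pvStepA, pvStepB, h1, h2, h3]
  have hfold : fields.foldl (pvStepB b) (some []) = pvPartsA b fields := by
    unfold pvPartsA
    exact PySem.List.foldl_congr_mem fields _ _ _ (fun acc f _ => hstep acc f)
  unfold pvKeyB
  rw [hfold]
  cases h : pvPartsA b fields with
  | none => simp [pvKeyA, h]
  | some ps => simp [pvKeyA, h]

-- under Pre_, A's key loop never raises
theorem pvPartsA_isSome (b : List (String × String)) (fields : List String)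
    (h : ∀ f ∈ fields, (f = "name" ∨ f = "tool" ∨ f = "method") ∧ (List.lookup f b).isSome = true) :
    (pvPartsA b fields).isSome = true := by
  unfold pvPartsA
  suffices hgen : ∀ (fs : List String), (∀ f ∈ fs, (f = "name" ∨ f = "tool" ∨ f = "method") ∧ (List.lookup f b).isSome = true) →
      ∀ (ps : List String), (fs.foldl (pvStepA b) (some ps)).isSome = true by
    exact hgen fields h []
  intro fs
  induction fs with
  | nil => intro _ ps; simp
  | cons f fs ih =>
    intro hall ps
    obtain ⟨hsup, hlook⟩ := hall f (by simp)
    obtain ⟨v, hv⟩ := Option.isSome_iff_exists.mp hlook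
    have hrest := fun g hg => hall g (List.mem_cons_of_mem f hg)
    have hstep : pvStepA b (some ps) f = some (ps ++ [v]) := by
      rcases hsup with h1 | h1 | h1 <;> subst h1 <;> simp [pvStepA, hv]
    simp only [List.foldl_cons, hstep]
    exact ih hrest (ps ++ [v])

-- A's key is never `some ""`
theorem pvKeyA_ne_some_empty (b : List (String × String)) (fields : List String) :
    (pvKeyA b fields).getD none ≠ some "" := by
  unfold pvKeyA
  cases h : pvPartsA b fields with
  | none => simp
  | some ps =>
    simp only [Option.map_some, Option.getD_some]
    split
    · simp
    · next hne =>
      intro hcontra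
      have : PySem.Str.join " " (ps.filter (fun p => !(p == ""))) = "" := by
        exact Option.some.inj hcontra
      simp [this] at hne

-- `·.getD ""` is injective away from `some ""`
theorem getD_empty_inj (a b : Option String) (ha : a ≠ some "") (hb : b ≠ some "")
    (h : a.getD "" = b.getD "") : a = b := by
  cases a with
  | none => cases b with
    | none => rfl
    | some s => simp at h; subst h; simp at hb
  | some s => cases b with
    | none => simp at h; subst h; simp at ha
    | some t => simp at h; subst h; rfl

-- ===== VERDICT (by name: the statement is the Claim_ definition above) =====
theorem group_benchmarks_spec : Claim_equal_group_benchmarks := by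
  intro bm gb _hdom hpre
  simp only [Spec_group_benchmarks, group_benchmarks, group_benchmarks_alt]
  set fields := (PySem.Str.split? gb ",").getD [] with hfields
  -- the common key function
  set kf : List (String × String) → Option String := fun b => (pvKeyA b fields).getD none with hkf
  have hkeyA : ∀ b ∈ bm, pvKeyA b fields = some (kf b) := by
    intro b hb
    have := pvPartsA_isSome b fields (hpre b hb)
    have hks : (pvKeyA b fields).isSome = true := by
      unfold pvKeyA; cases h : pvPartsA b fields with
      | none => rw [h] at this; simp at this
      | some ps => simp
    obtain ⟨k, hk⟩ := Option.isSome_iff_exists.mp hks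
    rw [hk]; simp [hkf, hk]
  -- A-side: the fold is a modify-append fold keyed by kf
  have hA1 : bm.foldl (fun d b =>
      match pvKeyA b fields with
      | some k => d.modify k [] (fun g => g ++ [b])
      | none => d)
      (PySem.Dict.empty : PySem.Dict (Option String) (List (List (String × String)))) =
      bm.foldl (fun d b => d.modify (kf b) [] (fun g => g ++ [b])) PySem.Dict.empty := by
    apply PySem.List.foldl_congr_mem
    intro acc b hb
    rw [hkeyA b hb]
  rw [hA1]
  set D := bm.foldl (fun d b => d.modify (kf b) [] (fun g => g ++ [b]))
      (PySem.Dict.empty : PySem.Dict (Option String) (List (List (String × String)))) with hD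
  -- keys and values of D
  have hkeys : D.keys = PySem.Set.ofList (bm.map kf) := by
    rw [hD, PySem.Dict.keys_foldl_modify_key bm kf [] (fun _ b => (fun g => g ++ [b]))]
    rfl
  have hnodup : D.keys.Nodup := by
    rw [hkeys]; exact PySem.Set.nodup_ofList _
  have hgetD : ∀ c, D.getD c [] = bm.filter (fun b => kf b == c) := by
    intro c
    have hmap : bm.foldl (fun d b => d.modify (kf b) [] (fun g => g ++ [b]))
        (PySem.Dict.empty : PySem.Dict (Option String) (List (List (String × String)))) =
        (bm.map (fun b => (kf b, b))).foldl (fun d p => d.modify p.1 [] (fun g => g ++ [p.2])) PySem.Dict.empty := by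
      rw [List.foldl_map]
    rw [hD, hmap, PySem.Dict.getD_foldl_modify_append]
    simp [List.filter_map, Function.comp_def]
  have hitems : D.items = (PySem.Set.ofList (bm.map kf)).map
      (fun k => (k, bm.filter (fun b => kf b == k))) := by
    rw [PySem.Dict.items_eq_map_keys D hnodup [], hkeys]
    exact List.map_congr_left (fun k _ => by rw [hgetD k])
  rw [hitems]
  -- the sorted key list
  set K0 : List (Option String) := PySem.Set.ofList (bm.map kf) with hK0
  set Ks := PySem.List.sorted K0 (fun k => k.getD "") false with hKs
  have hKne : ∀ k ∈ Ks, k ≠ some "" := by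
    intro k hk
    have : k ∈ K0 := ((PySem.List.mem_sorted K0 (fun k => k.getD "") false) k).mp hk
    have : k ∈ bm.map kf := (PySem.Set.mem_ofList _ _).mp this
    obtain ⟨b, _, rfl⟩ := List.mem_map.mp this
    exact pvKeyA_ne_some_empty b fields
  have hKlt : Ks.Pairwise (fun a b => a.getD "" < b.getD "") := by
    have hle : Ks.Pairwise (fun a b => a.getD "" ≤ b.getD "") :=
      PySem.List.sorted_pairwise K0 (fun k => k.getD "")
    have hnd : Ks.Nodup := by
      have : K0.Nodup := PySem.Set.nodup_ofList _
      exact ((PySem.List.sorted_perm K0 (fun k => k.getD "") false).symm.nodup_iff).mp this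
    exact (hle.and hnd).imp_of_mem (fun {a b} ha hb ⟨h1, h2⟩ =>
      lt_of_le_of_ne h1 (fun heq => h2 (getD_empty_inj a b (hKne a ha) (hKne b hb) heq)))
  -- A's sort of the items list is B's sorted-keys map
  have hsorted : PySem.List.sorted (K0.map (fun k => (k, bm.filter (fun b => kf b == k))))
      (fun p => p.1.getD "") false =
      Ks.map (fun k => (k, bm.filter (fun b => kf b == k))) := by
    apply PySem.List.sorted_eq_of_perm_of_pairwise_lt
    · exact (PySem.List.sorted_perm K0 (fun k => k.getD "") false).map _
    · exact List.pairwise_map.mpr (hKlt.imp (fun h => h))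
  rw [hsorted]
  -- B-side normalizes to the same expression
  simp only [pvKeyB_eq_pvKeyA, PySem.List.dedup_eq_ofList]
  rfl
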